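-- pv_equiv track=rewrite | github.com/Dylan-Cairns/magnate | scripts/opponent_pool.py | split_evenly
-- ===== SOURCE A (Python) =====
-- from typing import Dict, Iterable, List, Sequence, Tuple
--
-- def split_evenly(total_games: int, entries: Iterable[str]) -> Dict[str, int]:
--     keys = list(entries)
--     if total_games < 0:
--         raise ValueError("total_games must be >= 0.")
--     if not keys:
--         return {}
--     base = total_games // len(keys)
--     remainder = total_games % len(keys)
--     return {
--         key: base + (1 if index < remainder else 0)
--         for index, key in enumerate(keys)
--     }
-- ===== SOURCE B (Python) =====
-- def split_evenly(total_games: int, entries) -> dict: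
--     keys = list(entries)
--     if total_games < 0:
--         raise ValueError("total_games must be >= 0.")
--     result = {}
--     remaining = total_games
--     keys_left = len(keys)
--     for key in keys:
--         share = -(-remaining // keys_left)  # ceiling division
--         result[key] = share
--         remaining -= share
--         keys_left -= 1
--     return result
-- ===== Notes on version B (the rewrite author's own statement) =====
-- stated objective: alternative
-- what changed: Replaces the base/remainder arithmetic and the index<remainder comparison over enumerate with a single running loop that gives each key the ceiling of remaining/keys_left and updates the two counters; the empty-input early return disappears (the loop simply does not run).
import Mathlib
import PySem

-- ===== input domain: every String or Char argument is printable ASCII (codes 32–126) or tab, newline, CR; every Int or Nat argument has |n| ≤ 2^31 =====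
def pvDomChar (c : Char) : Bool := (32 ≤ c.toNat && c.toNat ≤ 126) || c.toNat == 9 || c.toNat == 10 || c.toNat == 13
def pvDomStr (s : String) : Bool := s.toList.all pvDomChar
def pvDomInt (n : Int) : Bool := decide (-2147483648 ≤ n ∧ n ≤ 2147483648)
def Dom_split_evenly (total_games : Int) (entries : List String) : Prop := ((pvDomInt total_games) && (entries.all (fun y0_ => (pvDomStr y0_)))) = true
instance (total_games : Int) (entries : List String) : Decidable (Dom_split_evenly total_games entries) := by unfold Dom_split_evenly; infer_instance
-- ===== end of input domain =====

-- B replaces base/remainder arithmetic with a running ceiling-division loop (same cost, different decomposition).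

-- ===== PORT A =====
def split_evenly (total_games : Int) (entries : List String) : List (String × Int) :=
  let keys := entries
  if total_games < 0 then []  -- Python raises ValueError here; excluded by Pre_
  else if keys = [] then []
  else
    let base := PySem.Int.floordiv total_games (keys.length : Int)
    let remainder := PySem.Int.mod total_games (keys.length : Int)
    ((PySem.List.enumerate keys 0).foldl
      (fun d p => d.insert p.2 (base + (if p.1 < remainder then 1 else 0)))
      PySem.Dict.empty).items

-- ===== PORT B =====
def splitLoop : List String → Int → Int → PySem.Dict String Int → PySem.Dict String Int
  | [], _, _, d => d
  | k :: ks, remaining, keys_left, d =>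
      let share := -(PySem.Int.floordiv (-remaining) keys_left)
      splitLoop ks (remaining - share) (keys_left - 1) (d.insert k share)

def split_evenly_alt (total_games : Int) (entries : List String) : List (String × Int) :=
  if total_games < 0 then []  -- Python raises ValueError here; excluded by Pre_
  else (splitLoop entries total_games (entries.length : Int) PySem.Dict.empty).items

-- ===== PRECONDITION & SPEC =====
-- Pre_ excludes exactly total_games < 0, where both Pythons raise ValueError.
def Pre_split_evenly (total_games : Int) (entries : List String) : Prop := 0 ≤ total_games
instance (total_games : Int) (entries : List String) : Decidable (Pre_split_evenly total_games entries) := by unfold Pre_split_evenly; infer_instance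
def pvWitness_split_evenly : Int × List String := (10, ["a", "b", "c"])

def Spec_split_evenly (total_games : Int) (entries : List String) (out : List (String × Int)) : Prop := out = split_evenly_alt total_games entries
instance (total_games : Int) (entries : List String) (out : List (String × Int)) : Decidable (Spec_split_evenly total_games entries out) := by unfold Spec_split_evenly; infer_instance

-- ===== CLAIM (what is proved, stated in full; the proofs are below) =====
def Claim_equal_split_evenly : Prop := ∀ (total_games : Int) (entries : List String), Dom_split_evenly total_games entries → Pre_split_evenly total_games entries → Spec_split_evenly total_games entries (split_evenly total_games entries)

-- ===== LEMMAS AND PROOFS =====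

-- The running ceiling-division loop computes, at index i, exactly A's value base + (1 if i < rem else 0).
lemma splitLoop_eq_fold (t base rem : Int) (n : Nat)
    (hb : base * n + rem = t) (h1 : rem < n) :
    ∀ (ks : List String) (i : Nat) (d : PySem.Dict String Int), i + ks.length = n →
      splitLoop ks (t - i * base - min (i : Int) rem) ((n : Int) - i) d
        = (PySem.List.enumerate ks (i : Int)).foldl
            (fun d p => d.insert p.2 (base + (if p.1 < rem then 1 else 0))) d := by
  intro ks
  induction ks with
  | nil => intro i d _; simp [splitLoop, PySem.List.enumerate]
  | cons k ks ih =>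
    intro i d hlen
    have hi : i < n := by simp at hlen; omega
    have hpos : (0 : Int) < (n : Int) - i := by exact_mod_cast (by omega : (0:Int) < n - i)
    have hni : base * ((n : Int) - i) = base * n - base * i := by ring
    have hshare : -(PySem.Int.floordiv (-(t - i * base - min (i : Int) rem)) ((n : Int) - i))
        = base + (if (i : Int) < rem then 1 else 0) := by
      rw [PySem.Int.neg_floordiv_neg_eq_iff_of_pos hpos]
      by_cases hir : (i : Int) < rem
      · simp only [hir, if_pos]
        have hmin : min (i : Int) rem = i := by omega
        rw [hmin]
        constructor <;> nlinarith
      · simp only [hir, if_neg, not_false_iff]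
        have hmin : min (i : Int) rem = rem := by omega
        rw [hmin]
        constructor <;> nlinarith
    rw [PySem.List.enumerate_cons]
    simp only [splitLoop, List.foldl_cons]
    rw [hshare]
    have hrec := ih (i + 1) (d.insert k (base + if (i : Int) < rem then 1 else 0)) (by simp at hlen ⊢; omega)
    have harg1 : t - i * base - min (i : Int) rem - (base + if (i : Int) < rem then 1 else 0)
        = t - (↑(i + 1)) * base - min (↑(i + 1) : Int) rem := by
      push_cast
      by_cases hir : (i : Int) < rem
      · have h2 : min (i : Int) rem = i := by omega
        have h3 : min ((i : Int) + 1) rem = i + 1 := by omega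
        rw [h2, h3, if_pos hir]; ring
      · have h2 : min (i : Int) rem = rem := by omega
        have h3 : min ((i : Int) + 1) rem = rem := by omega
        rw [h2, h3, if_neg hir]; ring
    have harg2 : (n : Int) - i - 1 = (n : Int) - (↑(i + 1)) := by push_cast; ring
    rw [harg1, harg2, hrec]
    push_cast
    ring_nf

-- ===== VERDICT (by name: the statement is the Claim_ definition above) =====
theorem split_evenly_spec : Claim_equal_split_evenly := by
  intro t entries _ hpre
  unfold Spec_split_evenly split_evenly split_evenly_alt
  have hneg : ¬ t < 0 := by exact not_lt.mpr hpre
  simp only [hneg, if_neg, not_false_iff]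
  cases entries with
  | nil => simp [splitLoop, PySem.Dict.empty]
  | cons k ks =>
    have hne : (k :: ks : List String) ≠ [] := by simp
    simp only [hne, if_neg, not_false_iff]
    set keys : List String := k :: ks with hkeys
    have hn : 0 < keys.length := by simp [hkeys]
    have hb := PySem.Int.floordiv_mul_add_mod t (keys.length : Int)
    have h0 := PySem.Int.mod_nonneg t (by exact_mod_cast hn : (0:Int) < (keys.length : Int))
    have h1 := PySem.Int.mod_lt t (by exact_mod_cast hn : (0:Int) < (keys.length : Int))
    have := splitLoop_eq_fold t (PySem.Int.floordiv t (keys.length : Int))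
      (PySem.Int.mod t (keys.length : Int)) keys.length hb (by exact_mod_cast h1)
      keys 0 PySem.Dict.empty (by simp)
    simp only [Nat.cast_zero, zero_mul, sub_zero] at this
    have hmin : min (0 : Int) (PySem.Int.mod t (keys.length : Int)) = 0 := by omega
    rw [hmin, sub_zero] at this
    rw [this]
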